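-- pv_equiv track=rewrite | github.com/Harsha-19/SIMS_Seating_Arrangement | api/utils.py | zigzag_positions
-- ===== SOURCE A (Python) =====
-- def zigzag_positions(rows, cols):
--     positions = []
--     for row_number in range(rows):
--         column_indexes = list(range(cols))
--         if row_number % 2 == 1:
--             column_indexes.reverse()
--         for column_index in column_indexes:
--             positions.append((row_number, column_index))
--     return positions
-- ===== SOURCE B (Python) =====
-- def zigzag_positions(rows, cols):
--     if rows <= 0 or cols <= 0:
--         return []
--     positions = []
--     for i in range(rows * cols):
--         row, offset = divmod(i, cols)
--         col = offset if row % 2 == 0 else cols - 1 - offset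
--         positions.append((row, col))
--     return positions
-- ===== Notes on version B (the rewrite author's own statement) =====
-- stated objective: alternative
-- what changed: Replaces the nested row/column loops with per-row list construction and reverse by a single pass over range(rows*cols) that recovers row and column from i by divmod and closed-form column arithmetic.
import Mathlib
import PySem

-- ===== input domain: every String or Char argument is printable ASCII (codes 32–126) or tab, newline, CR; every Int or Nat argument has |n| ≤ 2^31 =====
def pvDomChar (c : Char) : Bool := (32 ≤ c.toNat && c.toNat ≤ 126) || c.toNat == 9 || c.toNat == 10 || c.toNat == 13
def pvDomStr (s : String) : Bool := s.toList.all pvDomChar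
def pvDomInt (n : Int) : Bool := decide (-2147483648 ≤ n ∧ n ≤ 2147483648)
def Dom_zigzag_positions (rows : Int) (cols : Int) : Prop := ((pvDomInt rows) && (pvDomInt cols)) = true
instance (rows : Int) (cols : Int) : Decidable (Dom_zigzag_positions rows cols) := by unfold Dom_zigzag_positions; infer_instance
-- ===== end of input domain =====

-- B flattens A's nested loops (per-row list + reverse) into one pass over range(rows*cols) with divmod; same asymptotic cost.

-- ===== PORT A =====
def zigzag_positions (rows : Int) (cols : Int) : List (Int × Int) :=
  (PySem.List.pyRange 0 rows 1).foldl (fun positions row_number =>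
    let column_indexes := PySem.List.pyRange 0 cols 1
    let column_indexes :=
      if PySem.Int.mod row_number 2 == 1 then column_indexes.reverse else column_indexes
    column_indexes.foldl (fun ps c => ps ++ [(row_number, c)]) positions) []

-- ===== PORT B =====
def zigzag_positions_alt (rows : Int) (cols : Int) : List (Int × Int) :=
  if rows ≤ 0 ∨ cols ≤ 0 then []
  else
    (PySem.List.pyRange 0 (rows * cols) 1).foldl (fun positions i =>
      let row := PySem.Int.floordiv i cols
      let offset := PySem.Int.mod i cols
      let col := if PySem.Int.mod row 2 == 0 then offset else cols - 1 - offset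
      positions ++ [(row, col)]) []

-- ===== PRECONDITION & SPEC =====
def Spec_zigzag_positions (rows : Int) (cols : Int) (out : List (Int × Int)) : Prop := out = zigzag_positions_alt rows cols
instance (rows : Int) (cols : Int) (out : List (Int × Int)) : Decidable (Spec_zigzag_positions rows cols out) := by unfold Spec_zigzag_positions; infer_instance

-- ===== CLAIM (what is proved, stated in full; the proofs are below) =====
def Claim_equal_zigzag_positions : Prop := ∀ (rows : Int) (cols : Int), Dom_zigzag_positions rows cols → Spec_zigzag_positions rows cols (zigzag_positions rows cols)

-- ===== LEMMAS AND PROOFS =====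

-- A as a flatMap over rows
theorem zz_A_eq_flat (rows cols : Int) :
    zigzag_positions rows cols =
      (PySem.List.pyRange 0 rows 1).flatMap (fun r =>
        (if PySem.Int.mod r 2 == 1 then (PySem.List.pyRange 0 cols 1).reverse
         else PySem.List.pyRange 0 cols 1).map (fun c => (r, c))) := by
  simp only [zigzag_positions, PySem.List.foldl_append_singleton_eq_map,
    PySem.List.foldl_append_eq_flatMap, List.nil_append]

-- B's loop body as a map over range(rows*cols)
theorem zz_B_eq_map (rows cols : Int) (hr : 0 < rows) (hc : 0 < cols) :
    zigzag_positions_alt rows cols =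
      (PySem.List.pyRange 0 (rows * cols) 1).map (fun i =>
        (PySem.Int.floordiv i cols,
         if PySem.Int.mod (PySem.Int.floordiv i cols) 2 == 0 then PySem.Int.mod i cols
         else cols - 1 - PySem.Int.mod i cols)) := by
  rw [zigzag_positions_alt, if_neg (by omega)]
  simp only [PySem.List.foldl_append_singleton_eq_map, List.nil_append]

-- one block of C consecutive indices of B's single range yields exactly A's row r
theorem zz_block (r C : Nat) (hC : 0 < C) :
    (PySem.List.pyRange (↑(r * C)) (↑(r * C) + ↑C) 1).map (fun i =>
        (PySem.Int.floordiv i ↑C,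
         if PySem.Int.mod (PySem.Int.floordiv i ↑C) 2 == 0 then PySem.Int.mod i ↑C
         else ↑C - 1 - PySem.Int.mod i ↑C)) =
      (if PySem.Int.mod (↑r) 2 == 1 then (PySem.List.pyRange 0 (↑C) 1).reverse
       else PySem.List.pyRange 0 (↑C) 1).map (fun c => ((↑r : Int), c)) := by
  have hrev : (PySem.List.pyRange 0 (↑C) 1).reverse
      = PySem.List.pyRange ((↑C : Int) - 1) (-1) (-1) := by
    rw [PySem.List.pyRange_neg_one_eq_reverse]
    norm_num
  have h1 : ((↑(r * C) + (↑C : Int)) - ↑(r * C)).toNat = C := by omega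
  have h2 : ((↑C : Int) - 0).toNat = C := by omega
  have h3 : (((↑C : Int) - 1) - (-1)).toNat = C := by omega
  have hrmod : PySem.Int.mod ((r : Nat) : Int) 2 = (((r % 2 : Nat)) : Int) := by
    exact_mod_cast PySem.Int.mod_natCast r 2
  have hbody : ∀ k ∈ List.range C,
      ((fun i =>
          ((PySem.Int.floordiv i ↑C : Int),
           if PySem.Int.mod (PySem.Int.floordiv i ↑C) 2 == 0 then PySem.Int.mod i ↑C
           else ↑C - 1 - PySem.Int.mod i ↑C)) ∘ (fun k : Nat => (↑(r * C) : Int) + ↑k)) k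
        = ((↑r : Int), if r % 2 = 0 then (↑k : Int) else ↑C - 1 - ↑k) := by
    intro k hk
    have hkC : k < C := List.mem_range.mp hk
    have hcast : (↑(r * C) : Int) + ↑k = ((r * C + k : Nat) : Int) := by push_cast; ring
    have hdivN : (r * C + k) / C = r := by
      rw [Nat.mul_comm, Nat.mul_add_div hC, Nat.div_eq_of_lt hkC]; omega
    have hmodN : (r * C + k) % C = k := by
      rw [Nat.mul_comm, Nat.mul_add_mod, Nat.mod_eq_of_lt hkC]
    simp only [Function.comp_apply, hcast, PySem.Int.floordiv_natCast, PySem.Int.mod_natCast,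
      hdivN, hmodN, hrmod]
    rcases Nat.mod_two_eq_zero_or_one r with h | h <;> simp [h]
  rcases Nat.mod_two_eq_zero_or_one r with h | h
  · rw [if_neg (by rw [hrmod, h]; decide), PySem.List.pyRange_one, PySem.List.pyRange_one, h1, h2,
      List.map_map, List.map_map]
    refine List.map_congr_left (fun k hk => ?_)
    rw [hbody k hk]
    simp [h]
  · rw [if_pos (by rw [hrmod, h]; decide), hrev, PySem.List.pyRange_neg_one, PySem.List.pyRange_one,
      h1, h3, List.map_map, List.map_map]
    refine List.map_congr_left (fun k hk => ?_)
    rw [hbody k hk]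
    simp [h]

-- main induction: B's single pass equals A's flatMap, row count as a Nat
theorem zz_main (C : Nat) (hC : 0 < C) : ∀ R : Nat,
    (PySem.List.pyRange 0 (↑(R * C)) 1).map (fun i =>
        (PySem.Int.floordiv i ↑C,
         if PySem.Int.mod (PySem.Int.floordiv i ↑C) 2 == 0 then PySem.Int.mod i ↑C
         else ↑C - 1 - PySem.Int.mod i ↑C)) =
      (PySem.List.pyRange 0 (↑R) 1).flatMap (fun r =>
        (if PySem.Int.mod r 2 == 1 then (PySem.List.pyRange 0 (↑C) 1).reverse
         else PySem.List.pyRange 0 (↑C) 1).map (fun c => (r, c))) := by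
  intro R
  induction R with
  | zero => simp [PySem.List.pyRange_zero_nat]
  | succ R ih =>
    have hsplit : PySem.List.pyRange 0 (↑((R + 1) * C)) 1
        = PySem.List.pyRange 0 (↑(R * C)) 1
          ++ PySem.List.pyRange (↑(R * C)) (↑(R * C) + ↑C) 1 := by
      have : ((((R + 1) * C : Nat)) : Int) = ↑(R * C) + ↑C := by push_cast; ring
      rw [this]
      exact PySem.List.pyRange_one_append 0 (↑(R * C)) (↑(R * C) + ↑C)
        (by omega) (by omega)
    have hrows : PySem.List.pyRange 0 (↑(R + 1)) 1
        = PySem.List.pyRange 0 (↑R) 1 ++ [(↑R : Int)] := by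
      have : (((R + 1 : Nat)) : Int) = (↑R : Int) + 1 := by push_cast; ring
      rw [this]
      exact PySem.List.pyRange_one_succ_right (by positivity)
    rw [hsplit, hrows, List.map_append, List.flatMap_append, ih,
      List.flatMap_singleton, zz_block R C hC]

-- ===== VERDICT (by name: the statement is the Claim_ definition above) =====
theorem zigzag_positions_spec : Claim_equal_zigzag_positions := by
  intro rows cols _
  unfold Spec_zigzag_positions
  by_cases h : rows ≤ 0 ∨ cols ≤ 0
  · rw [zigzag_positions_alt, if_pos h, zz_A_eq_flat]
    rcases h with h | h
    · rw [PySem.List.pyRange_one_eq_nil h]; rfl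
    · simp [PySem.List.pyRange_one_eq_nil h]
  · have hr : 0 < rows := by omega
    have hc : 0 < cols := by omega
    obtain ⟨R, hR⟩ : ∃ R : Nat, rows = ↑R := ⟨rows.toNat, (Int.toNat_of_nonneg (by omega)).symm⟩
    obtain ⟨C, hCeq⟩ : ∃ C : Nat, cols = ↑C := ⟨cols.toNat, (Int.toNat_of_nonneg (by omega)).symm⟩
    subst hR hCeq
    have hC : 0 < C := by exact_mod_cast hc
    rw [zz_A_eq_flat, zz_B_eq_map _ _ hr hc]
    have : ((R : Int) * ↑C) = ((R * C : Nat) : Int) := by push_cast; ring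
    rw [this, zz_main C hC R]
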